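-- pv_equiv track=rewrite | github.com/MartinSergeev/Some-Project | finalRound.py | take_same
-- ===== SOURCE A (Python) =====
-- def take_same(numbers):
--     result = []
--     cur = 0
--     if not numbers:
--         return []
--     else:
--         result.append(numbers[0])
--         while cur < len(numbers) - 1 and numbers[cur] == numbers[cur + 1]:
--             result.append(numbers[cur + 1])
--             cur += 1
--     return result
-- ===== SOURCE B (Python) =====
-- def take_same(numbers):
--     if not numbers:
--         return []
--     first = numbers[0]
--     k = next((i for i, v in enumerate(numbers) if v != first), len(numbers))
--     return numbers[:k]
-- ===== Notes on version B (the rewrite author's own statement) =====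
-- stated objective: alternative
-- what changed: B first computes the boundary index k (the first position whose value differs from numbers[0], via a generator over enumerate with a default) and then returns the slice numbers[:k], instead of A's while loop that accumulates the result element by element with append.
import Mathlib
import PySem

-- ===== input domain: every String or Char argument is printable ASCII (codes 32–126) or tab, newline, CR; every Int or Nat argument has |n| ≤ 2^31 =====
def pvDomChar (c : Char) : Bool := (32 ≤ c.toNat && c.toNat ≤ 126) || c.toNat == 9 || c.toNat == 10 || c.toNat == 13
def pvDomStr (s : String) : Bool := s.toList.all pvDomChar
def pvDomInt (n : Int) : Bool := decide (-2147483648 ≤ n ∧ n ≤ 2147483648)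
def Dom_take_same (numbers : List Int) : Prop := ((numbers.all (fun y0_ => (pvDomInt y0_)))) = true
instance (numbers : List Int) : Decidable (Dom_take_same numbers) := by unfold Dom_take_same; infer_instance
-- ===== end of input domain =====

-- B computes the first-mismatch index k and returns the slice numbers[:k], instead of
-- A's while loop appending elements one by one; alternative decomposition, same cost.


-- ===== PORT A =====
-- A's while loop as structural recursion over the same state: `prev` is numbers[cur],
-- `rest` is numbers[cur+1:] (so `cur < len(numbers)-1` ↔ `rest` nonempty, and the
-- neighbour test numbers[cur] == numbers[cur + 1] is `prev = y`), `result` the accumulator.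
def take_same_loop (prev : Int) (rest : List Int) (result : List Int) : List Int :=
  match rest with
  | [] => result
  | y :: ys => if prev = y then take_same_loop y ys (result ++ [y]) else result

def take_same (numbers : List Int) : List Int :=
  match numbers with
  | [] => []
  | x :: xs => take_same_loop x xs [x]

-- ===== PORT B =====
-- Source B's generator `next((i for i, v in enumerate(numbers) if v != first), len(numbers))`:
-- scan with the running enumerate index `i`; reaching the end yields len(numbers).
def take_same_findMismatch (first : Int) (l : List Int) (i : Nat) : Nat :=
  match l with
  | [] => i
  | v :: vs => if v ≠ first then i else take_same_findMismatch first vs (i + 1)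

-- Source B: boundary index k first, then the slice numbers[:k].
def take_same_alt (numbers : List Int) : List Int :=
  match numbers with
  | [] => []
  | first :: _ =>
      PySem.List.slice numbers none (some ((take_same_findMismatch first numbers 0 : Nat) : Int))

-- ===== PRECONDITION & SPEC =====
def Spec_take_same (numbers : List Int) (out : List Int) : Prop := out = take_same_alt numbers
instance (numbers : List Int) (out : List Int) : Decidable (Spec_take_same numbers out) := by
  unfold Spec_take_same; infer_instance

-- ===== CLAIM =====
def Claim_equal_take_same : Prop :=
  ∀ (numbers : List Int), Dom_take_same numbers → Spec_take_same numbers (take_same numbers)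

-- ===== LEMMAS AND PROOFS =====
theorem take_same_loop_eq (prev : Int) (rest : List Int) (result : List Int) :
    take_same_loop prev rest result = result ++ rest.takeWhile (fun y => y == prev) := by
  induction rest generalizing prev result with
  | nil => simp [take_same_loop]
  | cons y ys ih =>
    by_cases h : prev = y
    · subst h
      simp [take_same_loop, ih]
    · have hb : (y == prev) = false := by
        rw [beq_eq_false_iff_ne]; exact fun he => h he.symm
      simp [take_same_loop, h, hb]

theorem take_same_findMismatch_eq (first : Int) (l : List Int) (i : Nat) :
    take_same_findMismatch first l i = i + (l.takeWhile (fun y => y == first)).length := by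
  induction l generalizing i with
  | nil => simp [take_same_findMismatch]
  | cons v vs ih =>
    by_cases h : v = first
    · subst h
      simp [take_same_findMismatch, ih]
      omega
    · have hb : (v == first) = false := by rw [beq_eq_false_iff_ne]; exact h
      simp [take_same_findMismatch, h, hb]

-- ===== VERDICT =====
theorem take_same_spec : Claim_equal_take_same := by
  intro numbers _
  unfold Spec_take_same
  cases numbers with
  | nil => rfl
  | cons x xs =>
    have hx : (x :: xs).takeWhile (fun y => y == x) = x :: xs.takeWhile (fun y => y == x) := by
      simp [List.takeWhile]
    simp only [take_same, take_same_alt]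
    rw [take_same_loop_eq, PySem.List.slice_to_natCast, take_same_findMismatch_eq, hx]
    simp only [List.length_cons, Nat.zero_add, List.take_succ_cons, List.singleton_append]
    rw [← (List.prefix_iff_eq_take.mp (List.takeWhile_prefix (l := xs) (p := fun y => y == x)))]
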